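-- pv_equiv track=rewrite | github.com/lennysunrealx/UnrealTools | Plugins/QuickWidgetTools/Content/Python/get_outputFolder.py | _get_section_value
-- ===== SOURCE A (Python) =====
-- def _find_section_bounds(lines, section_name):
--     section_header = f"[{section_name}]"
--     section_start = -1
--     section_end = len(lines)
--
--     for i, line in enumerate(lines):
--         if line.strip() == section_header:
--             section_start = i
--             break
--
--     if section_start == -1:
--         return -1, -1
--
--     for i in range(section_start + 1, len(lines)):
--         stripped = lines[i].strip()
--         if stripped.startswith("[") and stripped.endswith("]"):
--             section_end = i
--             break
--
--     return section_start, section_end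
--
-- def _get_section_value(text, section_name, key):
--     lines = text.splitlines()
--     section_start, section_end = _find_section_bounds(lines, section_name)
--     if section_start == -1:
--         return "", -1, -1
--
--     prefix = f"{key}="
--     for i in range(section_start + 1, section_end):
--         stripped = lines[i].strip()
--         if stripped.startswith(prefix):
--             return stripped[len(prefix):].strip(), section_start, i
--
--     return "", section_start, -1
-- ===== SOURCE B (Python) =====
-- def _get_section_value(text, section_name, key):
--     header = f"[{section_name}]"
--     prefix = f"{key}="
--     section_start = -1
--     in_section = False
--     for i, line in enumerate(text.splitlines()):
--         stripped = line.strip()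
--         if not in_section:
--             if stripped == header:
--                 section_start = i
--                 in_section = True
--         else:
--             if stripped.startswith("[") and stripped.endswith("]"):
--                 return "", section_start, -1
--             if stripped.startswith(prefix):
--                 return stripped[len(prefix):].strip(), section_start, i
--     return "", section_start, -1
-- ===== Notes on version B (the rewrite author's own statement) =====
-- stated objective: simpler
-- what changed: Replaced A's two-helper, three-loop design (scan for the section header, scan again for the section end, then re-scan the bounded index range for the key) with a single forward pass over the lines driven by an in_section flag, stripping each line once and returning as soon as the key or a new section header is met.
import Mathlib
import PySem

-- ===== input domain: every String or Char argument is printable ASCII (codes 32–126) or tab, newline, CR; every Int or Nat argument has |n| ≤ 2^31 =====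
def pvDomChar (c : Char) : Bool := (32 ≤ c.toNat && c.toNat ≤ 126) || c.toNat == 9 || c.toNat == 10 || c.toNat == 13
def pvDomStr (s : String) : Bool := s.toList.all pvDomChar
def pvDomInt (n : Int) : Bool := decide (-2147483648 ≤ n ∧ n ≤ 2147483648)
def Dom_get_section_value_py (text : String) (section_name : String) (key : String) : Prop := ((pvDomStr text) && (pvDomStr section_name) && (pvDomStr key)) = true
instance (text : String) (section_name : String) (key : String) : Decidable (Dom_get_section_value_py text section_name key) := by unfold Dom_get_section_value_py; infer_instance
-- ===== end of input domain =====

-- B replaces A's two-helper, three-loop design (find section start, find section end,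
-- then re-scan the range by index) with a single pass over the lines using an
-- in_section flag; same return value everywhere (objective: simpler).

-- ===== PORT A =====
-- first loop of _find_section_bounds: for i, line in enumerate(lines): if line.strip() == header: return i (break ≙ return)
def pvFindStartLoop (pairs : List (Int × String)) (header : String) : Int :=
  match pairs with
  | [] => -1
  | (i, line) :: rest =>
    if PySem.Str.strip line == header then i else pvFindStartLoop rest header

-- second loop of _find_section_bounds: for i in range(section_start+1, len(lines)): first bracketed line
-- (lines[i] is always in range here, so pyGetD with a dummy default is exact)
def pvFindEndLoop (lines : List String) (idxs : List Int) (section_end : Int) : Int :=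
  match idxs with
  | [] => section_end
  | i :: rest =>
    let stripped := PySem.Str.strip (PySem.List.pyGetD lines i "")
    if PySem.Str.startswith stripped "[" && PySem.Str.endswith stripped "]" then i
    else pvFindEndLoop lines rest section_end

def pvFindSectionBounds (lines : List String) (section_name : String) : Int × Int :=
  let header := "[" ++ section_name ++ "]"
  let section_start := pvFindStartLoop (PySem.List.enumerate lines 0) header
  if section_start == -1 then (-1, -1)
  else (section_start,
        pvFindEndLoop lines (PySem.List.pyRange (section_start + 1) (lines.length : Int)) (lines.length : Int))

-- key loop of _get_section_value: for i in range(section_start+1, section_end)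
def pvScanKeyLoop (lines : List String) (idxs : List Int) (pre : String) (section_start : Int) : String × Int × Int :=
  match idxs with
  | [] => ("", section_start, -1)
  | i :: rest =>
    let stripped := PySem.Str.strip (PySem.List.pyGetD lines i "")
    if PySem.Str.startswith stripped pre then
      (PySem.Str.strip (PySem.Str.slice stripped (some (PySem.Str.len pre)) none), section_start, i)
    else pvScanKeyLoop lines rest pre section_start

def get_section_value_py (text : String) (section_name : String) (key : String) : String × Int × Int :=
  let lines := PySem.Str.splitlines text
  let bounds := pvFindSectionBounds lines section_name
  let section_start := bounds.1
  let section_end := bounds.2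
  if section_start == -1 then ("", -1, -1)
  else
    let pre := key ++ "="
    pvScanKeyLoop lines (PySem.List.pyRange (section_start + 1) section_end) pre section_start

-- ===== PORT B =====
-- B, inside the section: first line of a new section ends the search, a key= line returns its value
def pvAltScan (rest : List String) (i : Int) (section_start : Int) (pre : String) : String × Int × Int :=
  match rest with
  | [] => ("", section_start, -1)
  | line :: t =>
    let stripped := PySem.Str.strip line
    if PySem.Str.startswith stripped "[" && PySem.Str.endswith stripped "]" then
      ("", section_start, -1)
    else if PySem.Str.startswith stripped pre then
      (PySem.Str.strip (PySem.Str.slice stripped (some (PySem.Str.len pre)) none), section_start, i)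
    else pvAltScan t (i + 1) section_start pre

-- B, before the section: looking for the header line
def pvAltFind (rest : List String) (i : Int) (header : String) (pre : String) : String × Int × Int :=
  match rest with
  | [] => ("", -1, -1)
  | line :: t =>
    if PySem.Str.strip line == header then pvAltScan t (i + 1) i pre
    else pvAltFind t (i + 1) header pre

def get_section_value_py_alt (text : String) (section_name : String) (key : String) : String × Int × Int :=
  pvAltFind (PySem.Str.splitlines text) 0 ("[" ++ section_name ++ "]") (key ++ "=")

-- ===== PRECONDITION & SPEC =====
def Spec_get_section_value_py (text : String) (section_name : String) (key : String) (out : String × Int × Int) : Prop := out = get_section_value_py_alt text section_name key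
instance (text : String) (section_name : String) (key : String) (out : String × Int × Int) : Decidable (Spec_get_section_value_py text section_name key out) := by unfold Spec_get_section_value_py; infer_instance

-- ===== CLAIM (what is proved, stated in full; the proofs are below) =====
def Claim_equal_get_section_value_py : Prop := ∀ (text : String) (section_name : String) (key : String), Dom_get_section_value_py text section_name key → Spec_get_section_value_py text section_name key (get_section_value_py text section_name key)

-- ===== LEMMAS AND PROOFS =====

-- A's "if section_start == -1 … else end-loop then key-loop", as one function of the start index
def pvATail (lines : List String) (start : Int) (pre : String) : String × Int × Int :=
  if start == -1 then ("", -1, -1)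
  else pvScanKeyLoop lines
    (PySem.List.pyRange (start + 1)
      (pvFindEndLoop lines (PySem.List.pyRange (start + 1) (lines.length : Int)) (lines.length : Int)))
    pre start

lemma pvFindEnd_ge (t : List String) : ∀ (lines : List String) (a : Nat),
    lines.drop a = t → a ≤ lines.length →
    (a : Int) ≤ pvFindEndLoop lines (PySem.List.pyRange (a : Int) (lines.length : Int)) (lines.length : Int) := by
  induction t with
  | nil =>
    intro lines a hd hle
    have : lines.length ≤ a := List.drop_eq_nil_iff.mp hd
    have ha : a = lines.length := le_antisymm hle this
    rw [PySem.List.pyRange_one_eq_nil (by exact_mod_cast ha.ge)]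
    simp [pvFindEndLoop, ha]
  | cons x t ih =>
    intro lines a hd hle
    have hlt : a < lines.length := by
      by_contra h
      rw [List.drop_eq_nil_iff.mpr (by omega)] at hd; simp at hd
    rw [PySem.List.pyRange_one_cons (by exact_mod_cast hlt)]
    simp only [pvFindEndLoop]
    split
    · exact le_refl _
    · have hd' : lines.drop (a + 1) = t := by rw [← List.tail_drop, hd]; rfl
      have := ih lines (a + 1) hd' (by omega)
      push_cast at this ⊢
      omega

lemma pvScan_eq (t : List String) : ∀ (lines : List String) (a : Nat) (s : Int) (pre : String),
    lines.drop a = t → a ≤ lines.length →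
    pvScanKeyLoop lines
      (PySem.List.pyRange (a : Int)
        (pvFindEndLoop lines (PySem.List.pyRange (a : Int) (lines.length : Int)) (lines.length : Int)))
      pre s
    = pvAltScan t (a : Int) s pre := by
  induction t with
  | nil =>
    intro lines a s pre hd hle
    have ha : a = lines.length := le_antisymm hle (List.drop_eq_nil_iff.mp hd)
    have h1 : PySem.List.pyRange (a : Int) (lines.length : Int) = [] :=
      PySem.List.pyRange_one_eq_nil (by exact_mod_cast ha.ge)
    rw [h1]
    simp only [pvFindEndLoop]
    rw [h1]
    simp [pvScanKeyLoop, pvAltScan]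
  | cons x t ih =>
    intro lines a s pre hd hle
    have hlt : a < lines.length := by
      by_contra h
      rw [List.drop_eq_nil_iff.mpr (by omega)] at hd; simp at hd
    have hx : PySem.List.pyGetD lines (a : Int) "" = x := by
      rw [PySem.List.pyGetD_natCast]
      have : lines[a]? = some x := by rw [← List.head?_drop, hd]; rfl
      simp [List.getD, this]
    have hd' : lines.drop (a + 1) = t := by rw [← List.tail_drop, hd]; rfl
    have hin : PySem.List.pyRange (a : Int) (lines.length : Int)
        = (a : Int) :: PySem.List.pyRange ((a : Int) + 1) (lines.length : Int) :=
      PySem.List.pyRange_one_cons (by exact_mod_cast hlt)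
    rw [hin]
    simp only [pvFindEndLoop, hx]
    by_cases hbr : (PySem.Str.startswith (PySem.Str.strip x) "[" && PySem.Str.endswith (PySem.Str.strip x) "]") = true
    · -- section ends here: A's key range is empty
      simp only [hbr, if_true]
      rw [PySem.List.pyRange_one_eq_nil (le_refl _)]
      simp only [pvScanKeyLoop, pvAltScan, hbr]
      simp
    · rw [Bool.not_eq_true] at hbr
      simp only [hbr, Bool.false_eq_true, if_false]
      have hge := pvFindEnd_ge t lines (a + 1) hd' (by omega)
      push_cast at hge
      rw [PySem.List.pyRange_one_cons (by omega)]
      simp only [pvScanKeyLoop, hx]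
      by_cases hk : PySem.Str.startswith (PySem.Str.strip x) pre = true
      · simp only [pvAltScan, hbr, hk]
        simp
      · rw [Bool.not_eq_true] at hk
        simp only [hk, Bool.false_eq_true, if_false]
        have := ih lines (a + 1) s pre hd' (by omega)
        push_cast at this
        rw [this]
        simp only [pvAltScan, hbr, hk]
        simp

lemma pvFind_eq (t : List String) : ∀ (lines : List String) (a : Nat) (header pre : String),
    lines.drop a = t →
    pvATail lines (pvFindStartLoop (PySem.List.enumerate t (a : Int)) header) pre
    = pvAltFind t (a : Int) header pre := by
  induction t with
  | nil =>
    intro lines a header pre _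
    simp [PySem.List.enumerate, pvFindStartLoop, pvATail, pvAltFind]
  | cons x t ih =>
    intro lines a header pre hd
    have hlt : a < lines.length := by
      by_contra h
      rw [List.drop_eq_nil_iff.mpr (by omega)] at hd; simp at hd
    have hd' : lines.drop (a + 1) = t := by rw [← List.tail_drop, hd]; rfl
    rw [PySem.List.enumerate_cons]
    simp only [pvFindStartLoop, pvAltFind]
    by_cases hh : (PySem.Str.strip x == header) = true
    · simp only [hh, if_true]
      have hne : ((a : Int) == -1) = false := by simp
      simp only [pvATail, hne]
      simp only [Bool.false_eq_true, if_false]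
      have := pvScan_eq t lines (a + 1) (a : Int) pre hd' (by omega)
      push_cast at this
      exact this
    · simp only [hh, Bool.false_eq_true, if_false]
      have := ih lines (a + 1) header pre hd'
      push_cast at this
      exact this

-- ===== VERDICT (by name: the statement is the Claim_ definition above) =====
theorem get_section_value_py_spec : Claim_equal_get_section_value_py := by
  intro text section_name key _
  unfold Spec_get_section_value_py get_section_value_py get_section_value_py_alt pvFindSectionBounds
  have h := pvFind_eq (PySem.Str.splitlines text) (PySem.Str.splitlines text) 0
    ("[" ++ section_name ++ "]") (key ++ "=") (by simp)
  simp only [Nat.cast_zero] at h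
  rw [← h]
  unfold pvATail
  split
  · simp_all
  · simp_all
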